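-- pv_equiv track=rewrite | github.com/arenadata/pytest_allure_spec_coverage | src/pytest_allure_spec_coverage/matcher.py | _select_report_color
-- ===== SOURCE A (Python) =====
-- def _select_report_color(spec_coverage_percent: int):
--     """
--     >>> _select_report_color(0)
--     'red'
--     >>> _select_report_color(50)
--     'red'
--     >>> _select_report_color(84)
--     'red'
--     >>> _select_report_color(85)
--     'yellow'
--     >>> _select_report_color(90)
--     'yellow'
--     >>> _select_report_color(99)
--     'yellow'
--     >>> _select_report_color(100)
--     'green'
--     >>> _select_report_color(101) # doctest: +IGNORE_EXCEPTION_DETAIL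
--     Traceback (most recent call last):
--     ValueError: Invalid value: coverage_percent=101
--     >>> _select_report_color(-1) # doctest: +IGNORE_EXCEPTION_DETAIL
--     Traceback (most recent call last):
--     ValueError: Invalid value: coverage_percent=-1
--     """
--     percents_colors = {
--         84: "red",
--         99: "yellow",
--         100: "green",
--     }
--     if spec_coverage_percent >= 0:
--         for percent, color in percents_colors.items():
--             if spec_coverage_percent <= percent:
--                 return color
--     raise ValueError(f"Invalid value: {spec_coverage_percent=}")
-- ===== SOURCE B (Python) =====
-- def _select_report_color(spec_coverage_percent: int):
--     if not 0 <= spec_coverage_percent <= 100: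
--         raise ValueError(f"Invalid value: {spec_coverage_percent=}")
--     index = (spec_coverage_percent > 84) + (spec_coverage_percent > 99)
--     return ("red", "yellow", "green")[index]
-- ===== Notes on version B (the rewrite author's own statement) =====
-- stated objective: alternative
-- what changed: Replaced the threshold-dict scan loop by branch-free arithmetic: after a range check, the colour index is computed as the sum of two boolean threshold tests and used to index a fixed tuple.
import Mathlib
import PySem

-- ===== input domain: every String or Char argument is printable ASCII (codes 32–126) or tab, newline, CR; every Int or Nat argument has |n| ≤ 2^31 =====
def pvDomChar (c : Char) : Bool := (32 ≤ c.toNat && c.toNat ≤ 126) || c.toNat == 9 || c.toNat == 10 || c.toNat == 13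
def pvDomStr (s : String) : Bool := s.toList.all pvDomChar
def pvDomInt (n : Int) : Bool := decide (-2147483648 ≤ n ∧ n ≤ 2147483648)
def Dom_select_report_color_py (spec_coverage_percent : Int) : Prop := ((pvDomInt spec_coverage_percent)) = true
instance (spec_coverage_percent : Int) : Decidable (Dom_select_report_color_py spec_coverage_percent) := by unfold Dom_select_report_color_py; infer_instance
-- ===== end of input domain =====

-- B replaces A's threshold-dict scan loop by a range check plus a branch-free arithmetic index
-- (sum of two boolean tests) into a fixed colour tuple (alternative decomposition).
-- Pre_ excludes the inputs (< 0 or > 100) on which A raises ValueError; B raises the same error there.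


-- ===== PORT A =====
-- the loop over the dict's items; `none` means the loop fell through (Python then raises)
def select_report_color_py_loop (spec_coverage_percent : Int) : List (Int × String) → Option String
  | [] => none
  | (percent, color) :: rest =>
      if spec_coverage_percent ≤ percent then some color
      else select_report_color_py_loop spec_coverage_percent rest

def select_report_color_py (spec_coverage_percent : Int) : String :=
  let percents_colors : List (Int × String) := [(84, "red"), (99, "yellow"), (100, "green")]
  if 0 ≤ spec_coverage_percent then
    match select_report_color_py_loop spec_coverage_percent percents_colors with
    | some color => color
    | none => ""   -- Python raises ValueError here; excluded by Pre_
  else ""          -- Python raises ValueError here; excluded by Pre_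

-- ===== PORT B =====
def select_report_color_py_alt (spec_coverage_percent : Int) : String :=
  if ¬ (0 ≤ spec_coverage_percent ∧ spec_coverage_percent ≤ 100) then ""  -- Python raises ValueError; excluded by Pre_
  else
    let index : Nat := (decide (84 < spec_coverage_percent)).toNat + (decide (99 < spec_coverage_percent)).toNat
    (["red", "yellow", "green"].getD index "")

-- ===== PRECONDITION & SPEC =====
-- Pre_ excludes exactly the inputs on which A raises ValueError (percent < 0 or > 100)
def Pre_select_report_color_py (spec_coverage_percent : Int) : Prop :=
  0 ≤ spec_coverage_percent ∧ spec_coverage_percent ≤ 100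
instance (spec_coverage_percent : Int) : Decidable (Pre_select_report_color_py spec_coverage_percent) := by unfold Pre_select_report_color_py; infer_instance
def pvWitness_select_report_color_py : Int := (85)
def Spec_select_report_color_py (spec_coverage_percent : Int) (out : String) : Prop := out = select_report_color_py_alt spec_coverage_percent
instance (spec_coverage_percent : Int) (out : String) : Decidable (Spec_select_report_color_py spec_coverage_percent out) := by unfold Spec_select_report_color_py; infer_instance

-- ===== CLAIM =====
def Claim_equal_select_report_color_py : Prop := ∀ (spec_coverage_percent : Int), Dom_select_report_color_py spec_coverage_percent → Pre_select_report_color_py spec_coverage_percent → Spec_select_report_color_py spec_coverage_percent (select_report_color_py spec_coverage_percent)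

-- ===== LEMMAS AND PROOFS =====

-- ===== VERDICT =====
theorem select_report_color_py_spec : Claim_equal_select_report_color_py := by
  intro p _ hpre
  obtain ⟨h0, h100⟩ := hpre
  unfold Spec_select_report_color_py select_report_color_py select_report_color_py_alt
    select_report_color_py_loop
  have hin : (0 ≤ p ∧ p ≤ 100) := ⟨h0, h100⟩
  by_cases h84 : p ≤ 84
  · simp [h0, h84, hin, show ¬ (84 < p) by omega, show ¬ (99 < p) by omega]
  · by_cases h99 : p ≤ 99
    · simp [select_report_color_py_loop, h0, h84, h99, hin,
        show 84 < p by omega, show ¬ (99 < p) by omega]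
    · simp [select_report_color_py_loop, h0, h84, h99, hin,
        show 84 < p by omega, show 99 < p by omega, show p ≤ 100 from h100]
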